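-- pv_equiv track=rewrite | github.com/pcdslab/dom-formula-assignment-using-ml | pipeline/plotting.py | group_peaklist_files_by_sample
-- ===== SOURCE A (Python) =====
-- def group_peaklist_files_by_sample(base_files):
--     # Group base_files by sample type prefix (e.g. PPFA, SRFA2, SRFA3)
--     groups = {'PPFA': [], 'SRFA2': [], 'SRFA3': []}
--     for base in base_files:
--         if base.startswith('PPFA'):
--             groups['PPFA'].append(base)
--         elif base.startswith('SRFA2'):
--             groups['SRFA2'].append(base)
--         elif base.startswith('SRFA3'):
--             groups['SRFA3'].append(base)
--     # Only keep non-empty groups, preserve order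
--     ordered = [groups[k] for k in ['PPFA', 'SRFA2', 'SRFA3'] if groups[k]]
--     return ordered
-- ===== SOURCE B (Python) =====
-- def group_peaklist_files_by_sample(base_files):
--     buckets = [[f for f in base_files if f.startswith(p)]
--                for p in ('PPFA', 'SRFA2', 'SRFA3')]
--     return [b for b in buckets if b]
-- ===== Notes on version B (the rewrite author's own statement) =====
-- stated objective: idiomatic
-- what changed: Replaces the single branching pass that appends into a dict of buckets by one filtering comprehension per fixed prefix (three scans), relying on the prefixes being mutually exclusive.
import Mathlib
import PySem

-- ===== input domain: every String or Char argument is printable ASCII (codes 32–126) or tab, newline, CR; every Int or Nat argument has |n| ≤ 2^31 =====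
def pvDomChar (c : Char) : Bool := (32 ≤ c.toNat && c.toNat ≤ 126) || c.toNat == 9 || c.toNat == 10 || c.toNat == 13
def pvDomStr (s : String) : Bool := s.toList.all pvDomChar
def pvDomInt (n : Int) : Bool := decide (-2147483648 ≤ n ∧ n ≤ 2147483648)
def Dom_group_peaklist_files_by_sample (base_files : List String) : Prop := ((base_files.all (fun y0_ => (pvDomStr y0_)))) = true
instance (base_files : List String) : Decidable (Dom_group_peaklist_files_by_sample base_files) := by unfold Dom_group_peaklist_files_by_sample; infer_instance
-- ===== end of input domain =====

-- B groups by filtering the list once per fixed prefix instead of A's single branching pass into a dict; idiomatic, same cost.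

-- ===== PORT A =====
def group_peaklist_files_by_sample (base_files : List String) : List (List String) :=
  let groups : PySem.Dict String (List String) :=
    ((PySem.Dict.empty.insert "PPFA" []).insert "SRFA2" []).insert "SRFA3" []
  let groups := base_files.foldl (fun g base =>
    if PySem.Str.startswith base "PPFA" then g.modify "PPFA" [] (· ++ [base])
    else if PySem.Str.startswith base "SRFA2" then g.modify "SRFA2" [] (· ++ [base])
    else if PySem.Str.startswith base "SRFA3" then g.modify "SRFA3" [] (· ++ [base])
    else g) groups
  (["PPFA", "SRFA2", "SRFA3"].foldl (fun acc k =>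
    if groups.getD k [] ≠ [] then acc ++ [groups.getD k []] else acc) [])

-- ===== PORT B =====
def group_peaklist_files_by_sample_alt (base_files : List String) : List (List String) :=
  let buckets := ["PPFA", "SRFA2", "SRFA3"].map
    (fun p => base_files.filter (fun f => PySem.Str.startswith f p))
  buckets.filter (fun b => b ≠ [])

-- ===== PRECONDITION & SPEC =====
def Spec_group_peaklist_files_by_sample (base_files : List String) (out : List (List String)) : Prop := out = group_peaklist_files_by_sample_alt base_files
instance (base_files : List String) (out : List (List String)) : Decidable (Spec_group_peaklist_files_by_sample base_files out) := by unfold Spec_group_peaklist_files_by_sample; infer_instance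

-- ===== CLAIM (what is proved, stated in full; the proofs are below) =====
def Claim_equal_group_peaklist_files_by_sample : Prop := ∀ (base_files : List String), Dom_group_peaklist_files_by_sample base_files → Spec_group_peaklist_files_by_sample base_files (group_peaklist_files_by_sample base_files)

-- ===== LEMMAS AND PROOFS =====

-- the three prefixes are mutually exclusive
lemma pv_no_P_S (s : String) (h : PySem.Str.startswith s "PPFA" = true) :
    PySem.Str.startswith s "SRFA2" = false ∧ PySem.Str.startswith s "SRFA3" = false := by
  simp only [PySem.Str.startswith_eq, PySem.Chars.startswith_iff] at h
  obtain ⟨t, ht⟩ := h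
  constructor <;> · simp only [PySem.Str.startswith_eq]
                    rw [Bool.eq_false_iff]
                    intro hc
                    rw [PySem.Chars.startswith_iff] at hc
                    obtain ⟨u, hu⟩ := hc
                    rw [← ht] at hu
                    simp at hu

lemma pv_no_S2_S3 (s : String) (h : PySem.Str.startswith s "SRFA2" = true) :
    PySem.Str.startswith s "SRFA3" = false := by
  simp only [PySem.Str.startswith_eq, PySem.Chars.startswith_iff] at h
  obtain ⟨t, ht⟩ := h
  simp only [PySem.Str.startswith_eq]
  rw [Bool.eq_false_iff]
  intro hc
  rw [PySem.Chars.startswith_iff] at hc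
  obtain ⟨u, hu⟩ := hc
  rw [← ht] at hu
  simp at hu

-- the loop body of port A, named so the invariant can speak about it
def pvStep (g : PySem.Dict String (List String)) (base : String) :
    PySem.Dict String (List String) :=
  if PySem.Str.startswith base "PPFA" then g.modify "PPFA" [] (· ++ [base])
  else if PySem.Str.startswith base "SRFA2" then g.modify "SRFA2" [] (· ++ [base])
  else if PySem.Str.startswith base "SRFA3" then g.modify "SRFA3" [] (· ++ [base])
  else g

lemma pv_fold_getD (l : List String) : ∀ (g : PySem.Dict String (List String)),
    (l.foldl pvStep g).getD "PPFA" []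
      = g.getD "PPFA" [] ++ l.filter (fun f => PySem.Str.startswith f "PPFA")
    ∧ (l.foldl pvStep g).getD "SRFA2" []
      = g.getD "SRFA2" [] ++ l.filter (fun f => PySem.Str.startswith f "SRFA2")
    ∧ (l.foldl pvStep g).getD "SRFA3" []
      = g.getD "SRFA3" [] ++ l.filter (fun f => PySem.Str.startswith f "SRFA3") := by
  induction l with
  | nil => intro g; simp
  | cons x xs ih =>
    intro g
    obtain ⟨i1, i2, i3⟩ := ih (pvStep g x)
    refine ⟨?_, ?_, ?_⟩ <;> simp only [List.foldl_cons, List.filter_cons, i1, i2, i3]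
    · by_cases hP : PySem.Str.startswith x "PPFA" = true
      · rw [hP, if_pos rfl,
          show pvStep g x = g.modify "PPFA" [] (· ++ [x]) from by
            unfold pvStep; rw [hP, if_pos rfl],
          PySem.Dict.getD_modify_self]
        simp
      · rw [Bool.eq_false_iff.mpr hP, if_neg (by simp)]
        have hg : (pvStep g x).getD "PPFA" [] = g.getD "PPFA" [] := by
          unfold pvStep
          rw [Bool.eq_false_iff.mpr hP]
          simp only [Bool.false_eq_true, if_false]
          split_ifs
          · exact PySem.Dict.getD_modify_of_ne g _ _ (by decide)
          · exact PySem.Dict.getD_modify_of_ne g _ _ (by decide)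
          · rfl
        rw [hg]
    · by_cases hQ : PySem.Str.startswith x "SRFA2" = true
      · have hP : PySem.Str.startswith x "PPFA" = false := by
          by_contra hc
          rw [Bool.not_eq_false] at hc
          have h2 := (pv_no_P_S x hc).1
          rw [hQ] at h2
          exact absurd h2 (by simp)
        rw [hQ, if_pos rfl,
          show pvStep g x = g.modify "SRFA2" [] (· ++ [x]) from by
            unfold pvStep
            rw [hP, hQ]
            simp,
          PySem.Dict.getD_modify_self]
        simp
      · rw [Bool.eq_false_iff.mpr hQ, if_neg (by simp)]
        have hg : (pvStep g x).getD "SRFA2" [] = g.getD "SRFA2" [] := by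
          unfold pvStep
          rw [Bool.eq_false_iff.mpr hQ]
          simp only [Bool.false_eq_true, if_false]
          split_ifs
          · exact PySem.Dict.getD_modify_of_ne g _ _ (by decide)
          · exact PySem.Dict.getD_modify_of_ne g _ _ (by decide)
          · rfl
        rw [hg]
    · by_cases hR : PySem.Str.startswith x "SRFA3" = true
      · have hP : PySem.Str.startswith x "PPFA" = false := by
          by_contra hc
          rw [Bool.not_eq_false] at hc
          have h3 := (pv_no_P_S x hc).2
          rw [hR] at h3
          exact absurd h3 (by simp)
        have hQ : PySem.Str.startswith x "SRFA2" = false := by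
          by_contra hc
          rw [Bool.not_eq_false] at hc
          have h3 := pv_no_S2_S3 x hc
          rw [hR] at h3
          exact absurd h3 (by simp)
        rw [hR, if_pos rfl,
          show pvStep g x = g.modify "SRFA3" [] (· ++ [x]) from by
            unfold pvStep
            rw [hP, hQ, hR]
            simp,
          PySem.Dict.getD_modify_self]
        simp
      · rw [Bool.eq_false_iff.mpr hR, if_neg (by simp)]
        have hg : (pvStep g x).getD "SRFA3" [] = g.getD "SRFA3" [] := by
          unfold pvStep
          rw [Bool.eq_false_iff.mpr hR]
          simp only [Bool.false_eq_true, if_false]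
          split_ifs
          · exact PySem.Dict.getD_modify_of_ne g _ _ (by decide)
          · exact PySem.Dict.getD_modify_of_ne g _ _ (by decide)
          · rfl
        rw [hg]

-- keeping the non-empty buckets in order: A's fold over the keys vs B's filter
lemma pv_assemble (P Q R : List String) :
    ([P, Q, R].foldl (fun acc b => if b ≠ [] then acc ++ [b] else acc)
      ([] : List (List String)))
    = [P, Q, R].filter (fun b => b ≠ []) := by
  simp only [List.foldl_cons, List.foldl_nil, List.filter_cons, List.filter_nil]
  by_cases h1 : P = [] <;> by_cases h2 : Q = [] <;> by_cases h3 : R = [] <;>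
    simp [h1, h2, h3]

-- ===== VERDICT (by name: the statement is the Claim_ definition above) =====
theorem group_peaklist_files_by_sample_spec : Claim_equal_group_peaklist_files_by_sample := by
  intro base_files _
  unfold Spec_group_peaklist_files_by_sample
  unfold group_peaklist_files_by_sample group_peaklist_files_by_sample_alt
  dsimp only
  rw [show (fun g base =>
        if PySem.Str.startswith base "PPFA" then g.modify "PPFA" [] (· ++ [base])
        else if PySem.Str.startswith base "SRFA2" then g.modify "SRFA2" [] (· ++ [base])
        else if PySem.Str.startswith base "SRFA3" then g.modify "SRFA3" [] (· ++ [base])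
        else g) = pvStep from rfl]
  obtain ⟨e1, e2, e3⟩ := pv_fold_getD base_files
    (((PySem.Dict.empty.insert "PPFA" []).insert "SRFA2" []).insert "SRFA3" [])
  rw [PySem.Dict.getD_insert_of_ne _ _ _ (by decide),
      PySem.Dict.getD_insert_of_ne _ _ _ (by decide),
      PySem.Dict.getD_insert_self, List.nil_append] at e1
  rw [PySem.Dict.getD_insert_of_ne _ _ _ (by decide),
      PySem.Dict.getD_insert_self, List.nil_append] at e2
  rw [PySem.Dict.getD_insert_self, List.nil_append] at e3
  simp only [List.foldl_cons, List.foldl_nil, List.map_cons, List.map_nil, e1, e2, e3]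
  exact pv_assemble _ _ _
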